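-- pv_equiv track=rewrite | github.com/toshitana/atcoder | training/abc_276_C.py | findMinimalSuffix
-- ===== SOURCE A (Python) =====
-- def findMinimalSuffix(arr):
--   index = len(arr)-1;
--   for i in range(len(arr) - 1, -1, -1):
--     index = i
--     if(i==0):
--       break
--     if (arr[i] < arr[i-1]):
--       break
--   return index;
-- ===== SOURCE B (Python) =====
-- def findMinimalSuffix(arr):
--     descents = [i for i in range(1, len(arr)) if arr[i] < arr[i-1]]
--     if descents:
--         return max(descents)
--     return 0 if arr else -1
-- ===== Notes on version B (the rewrite author's own statement) =====
-- stated objective: alternative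
-- what changed: Replaces A's right-to-left scan with early break by a forward pass collecting all descent positions and a max reduction over that list (sentinels 0 for no descent, -1 for empty reproduced).
import Mathlib
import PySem

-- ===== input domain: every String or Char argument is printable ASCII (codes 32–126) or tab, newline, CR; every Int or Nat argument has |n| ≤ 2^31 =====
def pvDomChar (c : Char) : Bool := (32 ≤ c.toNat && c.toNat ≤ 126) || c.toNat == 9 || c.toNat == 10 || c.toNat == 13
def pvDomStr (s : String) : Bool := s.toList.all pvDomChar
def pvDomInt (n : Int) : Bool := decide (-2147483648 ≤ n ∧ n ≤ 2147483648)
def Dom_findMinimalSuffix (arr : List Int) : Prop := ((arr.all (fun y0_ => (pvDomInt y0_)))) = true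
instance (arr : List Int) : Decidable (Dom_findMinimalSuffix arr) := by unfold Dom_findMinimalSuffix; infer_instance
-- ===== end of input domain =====

-- B replaces A's right-to-left scan with early break by a forward descent-collecting pass
-- followed by a max reduction; objective: alternative decomposition (same cost).

-- ===== PORT A =====
-- the for-loop from len(arr)-1 down to 0 with its two breaks; j is the current index
def findMinimalSuffixGo (arr : List Int) : Nat → Int
  | 0 => 0
  | j + 1 =>
      if PySem.List.pyGetD arr ((j : Int) + 1) 0 < PySem.List.pyGetD arr (j : Int) 0 then
        (j : Int) + 1
      else
        findMinimalSuffixGo arr j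

def findMinimalSuffix (arr : List Int) : Int :=
  if arr = [] then -1 else findMinimalSuffixGo arr (arr.length - 1)

-- ===== PORT B =====
def findMinimalSuffix_alt (arr : List Int) : Int :=
  let descents : List Int :=
    (PySem.List.pyRange 1 (arr.length : Int) 1).filter
      (fun i => decide (PySem.List.pyGetD arr i 0 < PySem.List.pyGetD arr (i - 1) 0))
  match PySem.List.max? descents (fun i => i) with
  | some m => m
  | none => if arr = [] then -1 else 0

-- ===== PRECONDITION & SPEC =====
def Spec_findMinimalSuffix (arr : List Int) (out : Int) : Prop := out = findMinimalSuffix_alt arr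
instance (arr : List Int) (out : Int) : Decidable (Spec_findMinimalSuffix arr out) := by unfold Spec_findMinimalSuffix; infer_instance

-- ===== CLAIM (what is proved, stated in full; the proofs are below) =====
def Claim_equal_findMinimalSuffix : Prop := ∀ (arr : List Int), Dom_findMinimalSuffix arr → Spec_findMinimalSuffix arr (findMinimalSuffix arr)

-- ===== LEMMAS AND PROOFS =====

theorem pv_foldl_max_le (b : Int) (t : List Int) (x : Int)
    (hx : x ≤ b) (ht : ∀ y ∈ t, y ≤ b) : t.foldl max x ≤ b := by
  induction t generalizing x with
  | nil => exact hx
  | cons h tl ih =>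
      exact ih (max x h) (max_le hx (ht h (by simp))) (fun y hy => ht y (by simp [hy]))

-- max? of a list of elements ≤ j with j+1 appended is j+1
theorem pv_max?_append_big (F : List Int) (a : Int)
    (hF : ∀ y ∈ F, y < a) :
    PySem.List.max? (F ++ [a]) (fun i => i) = some a := by
  cases F with
  | nil => simp [PySem.List.max?]
  | cons x t =>
      rw [List.cons_append, PySem.List.max?_id_cons, List.foldl_append]
      simp only [List.foldl_cons, List.foldl_nil]
      have hle : t.foldl max x ≤ a - 1 := by
        apply pv_foldl_max_le
        · have := hF x (by simp); omega
        · intro y hy; have := hF y (by simp [hy]); omega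
      have : max (t.foldl max x) a = a := by omega
      rw [this]

theorem pv_go_eq (arr : List Int) (j : Nat) :
    findMinimalSuffixGo arr j =
      match PySem.List.max?
          ((PySem.List.pyRange 1 ((j : Int) + 1) 1).filter
            (fun i => decide (PySem.List.pyGetD arr i 0 < PySem.List.pyGetD arr (i - 1) 0)))
          (fun i => i) with
      | some m => m
      | none => 0 := by
  induction j with
  | zero =>
      rw [PySem.List.pyRange_one_eq_nil (by norm_num)]
      simp [findMinimalSuffixGo, PySem.List.max?]
  | succ j ih =>
      have hsplit : PySem.List.pyRange 1 ((j : Int) + 1 + 1) 1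
          = PySem.List.pyRange 1 ((j : Int) + 1) 1 ++ [(j : Int) + 1] :=
        PySem.List.pyRange_one_succ_right (by omega)
      have hmem : ∀ y ∈ (PySem.List.pyRange 1 ((j : Int) + 1) 1).filter
          (fun i => decide (PySem.List.pyGetD arr i 0 < PySem.List.pyGetD arr (i - 1) 0)),
          y < (j : Int) + 1 := by
        intro y hy
        have := (PySem.List.mem_pyRange_one.mp (List.mem_of_mem_filter hy)).2
        omega
      show (if PySem.List.pyGetD arr ((j : Int) + 1) 0 < PySem.List.pyGetD arr (j : Int) 0 then
        (j : Int) + 1 else findMinimalSuffixGo arr j) = _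
      push_cast
      rw [hsplit, List.filter_append]
      by_cases hp : PySem.List.pyGetD arr ((j : Int) + 1) 0 < PySem.List.pyGetD arr ((j : Int) + 1 - 1) 0
      · have h1 : ((j : Int) + 1 - 1) = (j : Int) := by omega
        rw [h1] at hp
        simp only [List.filter_cons, List.filter_nil]
        rw [if_pos hp]
        have : (decide (PySem.List.pyGetD arr ((j:Int)+1) 0 < PySem.List.pyGetD arr ((j:Int)+1-1) 0)) = true := by
          rw [h1]; exact decide_eq_true hp
        rw [this]
        simp only [if_true]
        rw [pv_max?_append_big _ _ hmem]
      · have h1 : ((j : Int) + 1 - 1) = (j : Int) := by omega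
        rw [h1] at hp
        simp only [List.filter_cons, List.filter_nil]
        rw [if_neg hp]
        have : (decide (PySem.List.pyGetD arr ((j:Int)+1) 0 < PySem.List.pyGetD arr ((j:Int)+1-1) 0)) = false := by
          rw [h1]; exact decide_eq_false hp
        rw [this]
        simp only [Bool.false_eq_true, if_false, List.append_nil]
        exact ih

-- ===== VERDICT (by name: the statement is the Claim_ definition above) =====
theorem findMinimalSuffix_spec : Claim_equal_findMinimalSuffix := by
  intro arr _
  unfold Spec_findMinimalSuffix findMinimalSuffix findMinimalSuffix_alt
  by_cases h : arr = []
  · subst h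
    rw [if_pos rfl]
    simp [PySem.List.pyRange_one_eq_nil (by norm_num : (0:Int) ≤ 1), PySem.List.max?]
  · rw [if_neg h]
    have hn : 1 ≤ arr.length := by
      cases arr with
      | nil => exact absurd rfl h
      | cons a t => simp
    have hcast : ((arr.length - 1 : Nat) : Int) + 1 = (arr.length : Int) := by omega
    rw [pv_go_eq arr (arr.length - 1), hcast]
    cases hm : PySem.List.max?
        ((PySem.List.pyRange 1 (arr.length : Int) 1).filter
          (fun i => decide (PySem.List.pyGetD arr i 0 < PySem.List.pyGetD arr (i - 1) 0)))
        (fun i => i) with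
    | none => simp [hm, h]
    | some m => simp [hm]
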